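-- pv_equiv track=rewrite | github.com/Juyear009/Python-First-Class-Problem | 1급 1차 - 5.py | solution
-- ===== SOURCE A (Python) =====
-- def solution(n):
--     list = []
--     result = 0
--     cnt = n + 1
--     for i in range(1, n * n + 1):
--         list.append(i)
--     for x in range(len(list)):
--         if cnt == n + 1:
--             result += list[x]
--             cnt = 0
--         cnt += 1
--     return result
-- ===== SOURCE B (Python) =====
-- def solution(n):
--     # Closed form: the diagonal of an n x n matrix filled row-wise with 1..n^2
--     # holds 1, (n+1)+1, 2(n+1)+1, ..., (n-1)(n+1)+1; their sum is n*(n^2+1)/2.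
--     return n * (n * n + 1) // 2
-- ===== Notes on version B (the rewrite author's own statement) =====
-- stated objective: faster
-- what changed: Replaces A's materialisation of the list 1..n^2 and its counter-driven scan over all n^2 entries by the closed-form magic-constant formula n*(n^2+1)//2 for the diagonal sum.
-- intended difference: For n < 0 A still builds the n^2-element list and its counter fires only on the first element, so it returns 1; B returns the closed form n*(n^2+1)//2 (e.g. -1 at n=-1), the natural arithmetic extension of the diagonal sum, which is the intended value on this unspecified corner. — e.g. on solution(-1): A returns 1, B returns -1
import Mathlib
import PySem

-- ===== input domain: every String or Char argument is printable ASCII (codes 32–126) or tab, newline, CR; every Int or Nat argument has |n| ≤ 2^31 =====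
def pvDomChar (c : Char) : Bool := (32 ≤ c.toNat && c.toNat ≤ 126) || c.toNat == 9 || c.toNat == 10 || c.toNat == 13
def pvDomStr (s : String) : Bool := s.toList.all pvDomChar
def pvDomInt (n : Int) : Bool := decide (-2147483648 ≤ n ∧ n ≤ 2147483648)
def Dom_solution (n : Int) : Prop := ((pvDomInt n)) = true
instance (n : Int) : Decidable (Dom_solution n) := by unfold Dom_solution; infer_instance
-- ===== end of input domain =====

-- B replaces A's list build (1..n^2) and counter-driven scan over all n^2 entries by the
-- closed form n*(n^2+1)//2 (objective: faster); for n < 0 A returns 1 and B the formula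
-- value — stated as the intended difference D_solution below.


-- ===== PORT A =====
def solution (n : Int) : Int :=
  let list : List Int :=
    (PySem.List.pyRange 1 (n * n + 1) 1).foldl (fun acc i => acc ++ [i]) []
  let s : Int × Int :=
    (PySem.List.pyRange 0 (list.length : Int) 1).foldl
      (fun (p : Int × Int) x =>
        let p := if p.2 == n + 1 then (p.1 + PySem.List.pyGetD list x 0, (0 : Int)) else p
        (p.1, p.2 + 1))
      (0, n + 1)
  s.1

-- ===== PORT B =====
def solution_alt (n : Int) : Int := PySem.Int.floordiv (n * (n * n + 1)) 2

-- ===== PRECONDITION & SPEC =====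
-- For n < 0 A still builds the n^2-element list and only the first iteration of its counter
-- loop fires, so it returns 1; B returns the closed form n*(n^2+1)//2 (e.g. -1 at n = -1),
-- the natural arithmetic extension of the diagonal sum and the intended value on this corner.
def D_solution (n : Int) : Prop := n < 0
instance (n : Int) : Decidable (D_solution n) := by unfold D_solution; infer_instance

def Spec_solution (n : Int) (out : Int) : Prop := ¬ D_solution n → out = solution_alt n
instance (n : Int) (out : Int) : Decidable (Spec_solution n out) := by unfold Spec_solution; infer_instance

def pvDiffWitness_solution : Int := (-1)
def pvDiffWitnessOut_solution : Int × Int := (1, -1)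

-- ===== CLAIM (what is proved, stated in full; the proofs are below) =====
def Claim_unchanged_solution : Prop := ∀ (n : Int), Dom_solution n → Spec_solution n (solution n)
def Claim_changed_solution : Prop := Dom_solution (pvDiffWitness_solution) ∧ D_solution (pvDiffWitness_solution) ∧ solution (pvDiffWitness_solution) = pvDiffWitnessOut_solution.1 ∧ solution_alt (pvDiffWitness_solution) = pvDiffWitnessOut_solution.2 ∧ pvDiffWitnessOut_solution.1 ≠ pvDiffWitnessOut_solution.2
def Claim_exact_solution : Prop := ∀ (n : Int), Dom_solution n → D_solution n → solution n ≠ solution_alt n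

-- ===== LEMMAS AND PROOFS =====

-- A's inner loop body, with the value list[x] already substituted.
def stepA (n : Int) (p : Int × Int) (v : Int) : Int × Int :=
  if p.2 = n + 1 then (p.1 + v, 1) else (p.1, p.2 + 1)

theorem solution_eq_foldl (n : Int) :
    solution n = ((PySem.List.pyRange 1 (n * n + 1) 1).foldl (stepA n) (0, n + 1)).1 := by
  unfold solution
  simp only [PySem.List.foldl_append_singleton, List.nil_append]
  rw [PySem.List.foldl_pyRange_zero_pyGetD' (PySem.List.pyRange 1 (n*n+1) 1) 0
      (fun p v => ((if p.2 == n + 1 then (p.1 + v, (0:Int)) else p).1,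
                   (if p.2 == n + 1 then (p.1 + v, (0:Int)) else p).2 + 1)) (0, n+1)]
  congr 1
  apply PySem.List.foldl_congr_mem
  intro p v _
  unfold stepA
  by_cases h : p.2 = n + 1 <;> simp [h]

-- a run of iterations in which the counter never reaches n+1: only cnt increments
theorem run_inc (n : Int) (m : Nat) :
    ∀ (u r c : Int), (∀ k : Nat, k < m → c + k ≠ n + 1) →
      (PySem.List.pyRange u (u + m) 1).foldl (stepA n) (r, c) = (r, c + m) := by
  induction m with
  | zero =>
      intro u r c _
      rw [PySem.List.pyRange_one_eq_nil (by push_cast; omega)]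
      simp
  | succ m ih =>
      intro u r c h
      rw [PySem.List.pyRange_one_cons (by push_cast; omega)]
      have hc : c ≠ n + 1 := by have := h 0 (by omega); simpa using this
      have hstep : stepA n (r, c) u = (r, c + 1) := by unfold stepA; simp [hc]
      rw [List.foldl_cons, hstep]
      have harg : u + ((m : Int) + 1) = (u + 1) + (m : Int) := by ring
      have := ih (u + 1) r (c + 1) (by intro k hk; have := h (k+1) (by omega); push_cast at *; omega)
      push_cast
      rw [harg, this]
      ring_nf

-- one full block of n+1 values starting with cnt = 1: the counter fires exactly on the last one
theorem block (n : Int) (hn : 1 ≤ n) (a r : Int) :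
    (PySem.List.pyRange (a + 1) (a + 1 + (n + 1)) 1).foldl (stepA n) (r, 1)
      = (r + a + (n + 1), 1) := by
  have hsplit : PySem.List.pyRange (a + 1) (a + 1 + (n + 1)) 1
      = PySem.List.pyRange (a + 1) (a + n + 1) 1 ++ [a + n + 1] := by
    have h2 : a + 1 + (n + 1) = (a + n + 1) + 1 := by ring
    rw [h2, PySem.List.pyRange_one_succ_right (h := by omega)]
  rw [hsplit, List.foldl_append]
  have hfirst : (PySem.List.pyRange (a + 1) (a + 1 + (n.toNat : Int)) 1).foldl (stepA n) (r, 1)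
      = (r, 1 + (n.toNat : Int)) := by
    exact run_inc n n.toNat (a + 1) r 1 (by intro k hk; omega)
  have hnn : (n.toNat : Int) = n := by omega
  rw [hnn] at hfirst
  have heq : a + n + 1 = a + 1 + n := by ring
  rw [heq, hfirst]
  have hs : stepA n (r, 1 + n) (a + 1 + n) = (r + (a + 1 + n), 1) := by
    have h3 : 1 + n = n + 1 := by ring
    unfold stepA; rw [h3]; simp
  simp only [List.foldl_cons, List.foldl_nil, hs]
  congr 1; ring

-- j full blocks after the first firing step
theorem run_blocks (n : Int) (hn : 1 ≤ n) (j : Nat) :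
    ∃ s : Int, (PySem.List.pyRange 2 (2 + (j : Int) * (n + 1)) 1).foldl (stepA n) (1, 1) = (s, 1)
      ∧ 2 * s = 2 + 2 * (j : Int) + (j : Int) * ((j : Int) + 1) * (n + 1) := by
  induction j with
  | zero =>
      refine ⟨1, ?_, by push_cast; ring⟩
      rw [PySem.List.pyRange_one_eq_nil (by push_cast; omega)]
      simp
  | succ j ih =>
      obtain ⟨s, hfold, hsum⟩ := ih
      have hsplit : PySem.List.pyRange 2 (2 + ((j : Int) + 1) * (n + 1)) 1
          = PySem.List.pyRange 2 (2 + (j : Int) * (n + 1)) 1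
            ++ PySem.List.pyRange (2 + (j : Int) * (n + 1)) (2 + ((j : Int) + 1) * (n + 1)) 1 := by
        exact PySem.List.pyRange_one_append 2 (2 + (j : Int) * (n + 1))
          (2 + ((j : Int) + 1) * (n + 1)) (by nlinarith) (by nlinarith)
      have hblk := block n hn (1 + (j : Int) * (n + 1)) s
      refine ⟨s + (1 + (j : Int) * (n + 1)) + (n + 1), ?_, by push_cast; nlinarith⟩
      push_cast
      rw [hsplit, List.foldl_append, hfold]
      have harg1 : 2 + (j : Int) * (n + 1) = (1 + (j : Int) * (n + 1)) + 1 := by ring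
      have harg2 : 2 + ((j : Int) + 1) * (n + 1) = (1 + (j : Int) * (n + 1)) + 1 + (n + 1) := by ring
      rw [harg1, harg2, hblk]

theorem solution_neg (n : Int) (hn : n < 0) : solution n = 1 := by
  rw [solution_eq_foldl]
  have h1 : (1 : Int) < n * n + 1 := by nlinarith
  rw [PySem.List.pyRange_one_cons h1]
  have hstep : stepA n (0, n + 1) 1 = (1, 1) := by unfold stepA; simp
  rw [List.foldl_cons, hstep, show (1:Int)+1 = 2 by norm_num]
  have hm : (2 : Int) + ((n * n - 1).toNat : Int) = n * n + 1 := by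
    have : (0:Int) ≤ n * n - 1 := by nlinarith
    omega
  rw [← hm, run_inc n (n * n - 1).toNat 2 1 1 (by intro k hk; omega)]

theorem solution_nonneg (n : Int) (hn : 0 ≤ n) : solution n = solution_alt n := by
  rcases eq_or_lt_of_le hn with h0 | h1
  · subst h0
    rfl
  · rw [solution_eq_foldl]
    have hlt : (1 : Int) < n * n + 1 := by nlinarith
    rw [PySem.List.pyRange_one_cons hlt]
    have hstep : stepA n (0, n + 1) 1 = (1, 1) := by unfold stepA; simp
    rw [List.foldl_cons, hstep, show (1:Int)+1 = 2 by norm_num]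
    obtain ⟨s, hfold, hsum⟩ := run_blocks n (by omega) (n - 1).toNat
    have hcast : (((n - 1).toNat : Int)) = n - 1 := by omega
    rw [hcast] at hfold hsum
    have hend : (2 : Int) + (n - 1) * (n + 1) = n * n + 1 := by ring
    rw [hend] at hfold
    rw [hfold]
    have hX : n * (n * n + 1) = 2 * s := by nlinarith
    unfold solution_alt
    rw [PySem.Int.floordiv_eq_ediv_of_pos (by omega), hX]
    omega

-- ===== VERDICT (by name: the statement is the Claim_ definition above) =====
theorem solution_spec : Claim_unchanged_solution := by
  intro n _ hnd
  exact solution_nonneg n (by unfold D_solution at hnd; omega)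

theorem solution_changed : Claim_changed_solution := by
  unfold Claim_changed_solution; decide

theorem solution_tight : Claim_exact_solution := by
  intro n _ hd
  unfold D_solution at hd
  rw [solution_neg n hd]
  unfold solution_alt
  rw [PySem.Int.floordiv_eq_ediv_of_pos (by omega)]
  have h1 : n * (n * n + 1) ≤ -2 := by nlinarith
  omega
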